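-- pv_equiv track=rewrite | github.com/ydb-platform/ydb | contrib/python/ezdxf/ezdxf/acis/sat.py | parse_header_str
-- ===== SOURCE A (Python) =====
-- from typing import (
--     Any,
--     Sequence,
--     Iterator,
--     Union,
--     List,
--     TYPE_CHECKING,
--     Optional,
-- )
--
-- def parse_header_str(s: str) -> Iterator[str]:
--     num = ""
--     collect = 0
--     token = ""
--     for c in s.rstrip():
--         if collect > 0:
--             token += c
--             collect -= 1
--             if collect == 0:
--                 yield token
--                 token = ""
--         elif c == "@":
--             continue
--         elif c in "0123456789":
--             num += c
--         elif c == " " and num: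
--             collect = int(num)
--             num = ""
-- ===== SOURCE B (Python) =====
-- def parse_header_str(s):
--     t = s.rstrip()
--     i = 0
--     num = ""
--     while i < len(t):
--         c = t[i]
--         if c == "@":
--             pass
--         elif c in "0123456789":
--             num += c
--         elif c == " " and num:
--             n = int(num)
--             num = ""
--             if n > 0:
--                 if i + 1 + n <= len(t):
--                     yield t[i + 1 : i + 1 + n]
--                     i = i + 1 + n
--                     continue
--                 else:
--                     return
--         i += 1
-- ===== Notes on version B (the rewrite author's own statement) =====
-- stated objective: alternative
-- what changed: Replaces A's per-character state machine (collect countdown appending one char at a time to a token buffer) by an index/slice scan that, once a length prefix n is read, takes the whole token body as one slice and jumps the index past it, stopping early on a truncated token.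
import Mathlib
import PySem

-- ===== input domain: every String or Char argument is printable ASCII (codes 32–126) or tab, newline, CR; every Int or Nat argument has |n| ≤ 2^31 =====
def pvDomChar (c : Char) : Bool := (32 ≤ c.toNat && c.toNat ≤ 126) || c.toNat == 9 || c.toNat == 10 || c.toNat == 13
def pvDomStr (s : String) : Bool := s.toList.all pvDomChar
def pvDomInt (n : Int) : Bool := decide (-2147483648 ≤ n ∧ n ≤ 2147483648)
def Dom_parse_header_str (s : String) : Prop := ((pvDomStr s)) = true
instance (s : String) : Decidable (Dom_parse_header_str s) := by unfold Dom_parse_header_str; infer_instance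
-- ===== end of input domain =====

-- B replaces A's per-character collect-countdown state machine by an index/slice scan:
-- when a length prefix is read, the token body is taken as one slice and the index jumps
-- past it (objective: alternative decomposition, same cost).

-- ===== PORT A =====
-- A's generator loop: state (num, collect, token), yielded tokens accumulated in acc.
def pvALoop : List Char → List Char → Int → List Char → List String → List String
  | [], _, _, _, acc => acc
  | c :: cs, num, collect, token, acc =>
    if 0 < collect then
      -- token += c; collect -= 1; if collect == 0: yield token; token = ""
      if collect - 1 = 0 then pvALoop cs num 0 [] (acc ++ [String.ofList (token ++ [c])])
      else pvALoop cs num (collect - 1) (token ++ [c]) acc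
    else if c = '@' then pvALoop cs num collect token acc
    else if ("0123456789".toList).contains c then pvALoop cs (num ++ [c]) collect token acc
    else if c = ' ' ∧ num ≠ [] then
      -- collect = int(num); num = ""  (num is all digits, so int() cannot raise; getD 0 is never used)
      pvALoop cs [] ((PySem.Int.ofChars? num).getD 0) token acc
    else pvALoop cs num collect token acc

def parse_header_str (s : String) : List String :=
  pvALoop (PySem.Str.rstrip s).toList [] 0 [] []

-- ===== PORT B =====
-- B's scan: on ' ' after digits, slice the next n chars off as the token and jump past them.
def pvBLoop : List Char → List Char → List String
  | [], _ => []
  | c :: cs, num =>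
    if c = '@' then pvBLoop cs num
    else if ("0123456789".toList).contains c then pvBLoop cs (num ++ [c])
    else if c = ' ' ∧ num ≠ [] then
      let n : Int := (PySem.Int.ofChars? num).getD 0
      if 0 < n then
        if n ≤ (cs.length : Int) then String.ofList (cs.take n.toNat) :: pvBLoop (cs.drop n.toNat) []
        else []
      else pvBLoop cs []
    else pvBLoop cs num
termination_by cs _ => cs.length
decreasing_by all_goals simp

def parse_header_str_alt (s : String) : List String :=
  pvBLoop (PySem.Str.rstrip s).toList []

-- ===== PRECONDITION & SPEC =====
def Spec_parse_header_str (s : String) (out : List String) : Prop := out = parse_header_str_alt s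
instance (s : String) (out : List String) : Decidable (Spec_parse_header_str s out) := by unfold Spec_parse_header_str; infer_instance

-- ===== CLAIM (what is proved, stated in full; the proofs are below) =====
def Claim_equal_parse_header_str : Prop := ∀ (s : String), Dom_parse_header_str s → Spec_parse_header_str s (parse_header_str s)

-- ===== LEMMAS AND PROOFS =====

-- With a non-positive collect counter A's loop behaves exactly as with counter 0.
lemma pvALoop_nonpos (cs : List Char) : ∀ (num : List Char) (n : Int) (token : List Char)
    (acc : List String), n ≤ 0 →
    pvALoop cs num n token acc = pvALoop cs num 0 token acc := by
  induction cs with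
  | nil => intros; rfl
  | cons c cs ih =>
    intro num n token acc hn
    simp only [pvALoop, if_neg (by omega : ¬ 0 < n), if_neg (by omega : ¬ (0:Int) < 0)]
    split_ifs <;> first | rfl | exact ih _ _ _ _ hn

-- The collecting phase: with counter k > 0 A consumes the next k chars as the token
-- (yielding it), or consumes everything and yields nothing if fewer than k remain.
lemma pvALoop_collect (cs : List Char) : ∀ (k : Int), 0 < k → ∀ (num token : List Char)
    (acc : List String),
    pvALoop cs num k token acc =
      if k ≤ (cs.length : Int) then
        pvALoop (cs.drop k.toNat) num 0 [] (acc ++ [String.ofList (token ++ cs.take k.toNat)])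
      else acc := by
  induction cs with
  | nil =>
    intro k hk num token acc
    simp only [pvALoop, List.length_nil, Int.natCast_zero]
    rw [if_neg (by omega)]
  | cons c cs ih =>
    intro k hk num token acc
    simp only [pvALoop, if_pos hk]
    by_cases h1 : k - 1 = 0
    · have hk1 : k = 1 := by omega
      subst hk1
      rw [if_pos (by norm_num), if_pos (by simp)]
      simp only [Int.toNat_one, List.drop_succ_cons, List.take_succ_cons, List.take_zero, List.drop_zero]
    · rw [if_neg h1, ih (k - 1) (by omega) num (token ++ [c]) acc]
      have htn : k.toNat = (k - 1).toNat + 1 := by omega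
      by_cases h2 : k - 1 ≤ (cs.length : Int)
      · rw [if_pos h2, if_pos (by simp; omega)]
        simp only [htn, List.drop_succ_cons, List.take_succ_cons, List.append_assoc,
          List.cons_append, List.nil_append]
      · rw [if_neg h2, if_neg (by simp; omega)]

-- Main invariant: from a neutral state (counter 0, empty token) A's loop appends to acc
-- exactly what B's scan produces from the same remaining chars and digit buffer.
lemma pvLoop_agree (N : Nat) : ∀ (cs : List Char), cs.length ≤ N → ∀ (num : List Char)
    (acc : List String),
    pvALoop cs num 0 [] acc = acc ++ pvBLoop cs num := by
  induction N with
  | zero =>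
    intro cs hcs num acc
    have : cs = [] := List.eq_nil_of_length_eq_zero (by omega)
    subst this; simp [pvALoop, pvBLoop]
  | succ N ih =>
    intro cs hcs num acc
    match cs with
    | [] => simp [pvALoop, pvBLoop]
    | c :: cs =>
      simp only [List.length_cons] at hcs
      simp only [pvALoop, pvBLoop, if_neg (by omega : ¬ (0:Int) < 0)]
      by_cases hat : c = '@'
      · rw [if_pos hat, if_pos hat]; exact ih cs (by omega) num acc
      · rw [if_neg hat, if_neg hat]
        by_cases hdig : ("0123456789".toList).contains c
        · rw [if_pos hdig, if_pos hdig]; exact ih cs (by omega) _ acc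
        · rw [if_neg hdig, if_neg hdig]
          by_cases hsp : c = ' ' ∧ num ≠ []
          · rw [if_pos hsp, if_pos hsp]
            set n : Int := (PySem.Int.ofChars? num).getD 0 with hn
            by_cases hpos : 0 < n
            · rw [pvALoop_collect cs n hpos [] [] acc]
              by_cases hlen : n ≤ (cs.length : Int)
              · rw [if_pos hlen]
                rw [ih (cs.drop n.toNat) (by simp [List.length_drop]; omega) [] _]
                simp [hpos, hlen]
              · rw [if_neg hlen]
                simp [hpos, hlen]
            · rw [pvALoop_nonpos cs [] n [] acc (by omega)]
              rw [ih cs (by omega) [] acc]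
              simp [hpos]
          · rw [if_neg hsp, if_neg hsp]; exact ih cs (by omega) num acc

-- ===== VERDICT (by name: the statement is the Claim_ definition above) =====
theorem parse_header_str_spec : Claim_equal_parse_header_str := by
  intro s _
  unfold Spec_parse_header_str parse_header_str parse_header_str_alt
  simpa using pvLoop_agree (PySem.Str.rstrip s).toList.length _ le_rfl [] []
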